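-- pv_equiv track=rewrite | github.com/Kaja-K/adventofcode-2023 | 4_2.py | day4
-- ===== SOURCE A (Python) =====
-- def day4(line):
--     cards = line.splitlines()
--     tickets = [1] * len(cards)
--
--     for id, card in enumerate(cards):
--         _, card = card.split(": ")
--         l, r = card.split(" | ")
--         side1, side2 = set(l.split()), set(r.split())
--         count = len(side1 & side2)
--
--         for i in range(count):
--             tickets[id + 1 + i] += tickets[id]
--
--     return sum(tickets)
-- ===== SOURCE B (Python) =====
-- def day4(line):
--     cards = line.splitlines()
--     matches = []
--     for card in cards:
--         _, rest = card.split(": ")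
--         l, r = rest.split(" | ")
--         matches.append(len(set(l.split()) & set(r.split())))
--     counts = []
--     for j in range(len(matches)):
--         counts.append(1 + sum(counts[i] for i in range(j) if j <= i + matches[i]))
--     return sum(counts)
-- ===== Notes on version B (the rewrite author's own statement) =====
-- stated objective: alternative
-- what changed: A scatters each card's ticket count forward into a shared pre-initialised tickets array in one pass; B first builds the per-card match counts and then computes each card's copy count by gathering from the already-computed earlier counts, with no in-place array updates.
-- outside the precondition, e.g. on day4(': '): A raises ValueError, B raises ValueError; on day4(' | '): A raises ValueError, B raises ValueError; on day4('Card 1: 1 2 | 1 2'): A raises IndexError, B returns 1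
-- crash fix: On well-formed card lines whose match count runs past the last card, A raises IndexError on tickets[id+1+i] while B returns the total copy count. — e.g. on day4("Card 1: 1 2 | 1 2"): A raises IndexError, B returns 1
import Mathlib
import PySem

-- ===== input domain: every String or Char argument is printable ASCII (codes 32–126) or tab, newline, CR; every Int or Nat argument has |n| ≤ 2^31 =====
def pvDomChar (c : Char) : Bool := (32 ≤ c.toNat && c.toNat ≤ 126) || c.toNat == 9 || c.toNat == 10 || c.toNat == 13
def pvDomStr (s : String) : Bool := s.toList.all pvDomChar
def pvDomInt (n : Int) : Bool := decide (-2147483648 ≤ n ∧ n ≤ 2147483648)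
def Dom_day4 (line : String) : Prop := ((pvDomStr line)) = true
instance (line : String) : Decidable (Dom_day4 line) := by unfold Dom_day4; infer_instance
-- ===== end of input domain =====

-- B replaces A's in-place forward scatter over a shared tickets array by a two-pass gather:
-- first the match count of every card, then each card's copy count directly from the earlier
-- counts (objective: alternative decomposition, same asymptotic cost).
-- Equivalence is about the RETURN value; neither program mutates its argument.

-- shared parsing helper: number of winning matches of one card line
-- ('_, card = card.split(": ")' / 'l, r = card.split(" | ")'; the 0 fallback is only
-- reached where Python raises ValueError, which Pre_day4 excludes)
def cardMatches (card : String) : Nat :=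
  match PySem.Str.split? card ": " with
  | some [_, rest] =>
    match PySem.Str.split? rest " | " with
    | some [l, r] =>
      (PySem.Set.inter (PySem.Set.ofList (PySem.Str.split₀ l))
        (PySem.Set.ofList (PySem.Str.split₀ r))).length
    | _ => 0
  | _ => 0

-- ===== PORT A =====
-- 'for id, card in enumerate(cards)' = fold over zip(range(len(cards)), cards);
-- 'tickets[id+1+i] += tickets[id]' via List.set/getD: in range under Pre_day4
-- (out of range Python raises IndexError, which Pre_day4 excludes)
def day4 (line : String) : Int :=
  let cards := PySem.Str.splitlines line
  let tickets : List Int := List.replicate cards.length 1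
  let tickets := (List.zip (List.range cards.length) cards).foldl
    (fun t p =>
      let count := cardMatches p.2
      (List.range count).foldl
        (fun t i => t.set (p.1 + 1 + i) (t.getD (p.1 + 1 + i) 0 + t.getD p.1 0)) t)
    tickets
  tickets.sum

-- ===== PORT B =====
def day4_alt (line : String) : Int :=
  let cards := PySem.Str.splitlines line
  let ms := cards.map cardMatches
  let counts := (List.range ms.length).foldl
    (fun c j => c ++ [1 + (List.range j).foldl
        (fun s i => s + (if j ≤ i + ms.getD i 0 then c.getD i 0 else 0)) 0]) []
  counts.sum

-- ===== PRECONDITION & SPEC =====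
-- Pre_day4 = exactly where Python A returns: every card line splits into exactly two parts at
-- ": " and again at " | " (else ValueError), and no card's match count reaches past the last
-- card (else IndexError on 'tickets[id+1+i]').
def Pre_day4 (line : String) : Prop :=
  let cards := PySem.Str.splitlines line
  ∀ p ∈ List.zip (List.range cards.length) cards,
    ((PySem.Str.split? p.2 ": ").getD []).length = 2 ∧
    ((PySem.Str.split? (((PySem.Str.split? p.2 ": ").getD []).getD 1 "") " | ").getD []).length = 2 ∧
    p.1 + 1 + cardMatches p.2 ≤ cards.length
instance (line : String) : Decidable (Pre_day4 line) := by unfold Pre_day4; infer_instance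
def pvWitness_day4 : String := "Card 1: 1 2 | 2 3\nCard 2: 5 | 6"
def Spec_day4 (line : String) (out : Int) : Prop := out = day4_alt line
instance (line : String) (out : Int) : Decidable (Spec_day4 line out) := by unfold Spec_day4; infer_instance

-- On well-formed card lines whose match count runs past the last card, A raises IndexError while B returns the total.
def Raises_day4 (line : String) : Prop :=
  let cards := PySem.Str.splitlines line
  (∀ p ∈ List.zip (List.range cards.length) cards,
    ((PySem.Str.split? p.2 ": ").getD []).length = 2 ∧
    ((PySem.Str.split? (((PySem.Str.split? p.2 ": ").getD []).getD 1 "") " | ").getD []).length = 2) ∧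
  (∃ p ∈ List.zip (List.range cards.length) cards,
    cards.length < p.1 + 1 + cardMatches p.2)
instance (line : String) : Decidable (Raises_day4 line) := by unfold Raises_day4; infer_instance
def pvRaiseWitness_day4 : String := "Card 1: 1 2 | 1 2"
def pvRaiseWitnessOut_day4 : Int := 1

-- ===== CLAIM (what is proved, stated in full; the proofs are below) =====
def Claim_equal_day4 : Prop := ∀ (line : String), Dom_day4 line → Pre_day4 line → Spec_day4 line (day4 line)
def Claim_raises_day4 : Prop := (∀ (line : String), Dom_day4 line → Raises_day4 line → ¬ Pre_day4 line) ∧ (Dom_day4 (pvRaiseWitness_day4) ∧ Raises_day4 (pvRaiseWitness_day4) ∧ day4_alt (pvRaiseWitness_day4) = pvRaiseWitnessOut_day4)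

-- ===== LEMMAS AND PROOFS =====

-- the copy count of card j, as a recurrence on the earlier counts
def cnt (ms : List Nat) : Nat → Int
  | j => 1 + ((List.range j).attach.map (fun i =>
      if j ≤ i.1 + ms.getD i.1 0 then cnt ms i.1 else 0)).sum
decreasing_by exact List.mem_range.mp i.2

lemma cnt_eq (ms : List Nat) (j : Nat) :
    cnt ms j = 1 + ((List.range j).map (fun i =>
      if j ≤ i + ms.getD i 0 then cnt ms i else 0)).sum := by
  rw [cnt]; rw [List.attach_map_val (f := fun i => if j ≤ i + ms.getD i 0 then cnt ms i else 0)]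

-- the value of A's tickets cell j after the first k cards have been processed
def tval (ms : List Nat) (k j : Nat) : Int :=
  1 + ((List.range (min j k)).map (fun i =>
      if j ≤ i + ms.getD i 0 then cnt ms i else 0)).sum

lemma tval_self (ms : List Nat) (k j : Nat) (h : j ≤ k) : tval ms k j = cnt ms j := by
  rw [tval, cnt_eq, Nat.min_eq_left h]

lemma getD_set_int (l : List Int) (a : Nat) (v : Int) (j : Nat) (ha : a < l.length) :
    (l.set a v).getD j 0 = if j = a then v else l.getD j 0 := by
  simp only [List.getD_eq_getElem?_getD, List.getElem?_set, ha, if_true]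
  rcases eq_or_ne j a with h | h
  · simp [h]
  · rw [if_neg (fun hh => h hh.symm), if_neg h]

-- A's inner loop: add t[k] to cells k+1 .. k+m
lemma scat_inner (n k : Nat) : ∀ (m : Nat) (t : List Int), t.length = n → k + 1 + m ≤ n →
    ((List.range m).foldl
        (fun t i => t.set (k + 1 + i) (t.getD (k + 1 + i) 0 + t.getD k 0)) t).length = n ∧
    ∀ j, ((List.range m).foldl
        (fun t i => t.set (k + 1 + i) (t.getD (k + 1 + i) 0 + t.getD k 0)) t).getD j 0
      = t.getD j 0 + (if k + 1 ≤ j ∧ j < k + 1 + m then t.getD k 0 else 0) := by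
  intro m
  induction m with
  | zero => intro t ht _; exact ⟨ht, fun j => by simp⟩
  | succ m ih =>
    intro t ht hb
    have hb' : k + 1 + m ≤ n := by omega
    obtain ⟨hl, hv⟩ := ih t ht hb'
    rw [List.range_succ, List.foldl_append, List.foldl_cons, List.foldl_nil]
    have hk : k < n := by omega
    have htar : k + 1 + m < (List.foldl (fun t i => t.set (k + 1 + i) (t.getD (k + 1 + i) 0 + t.getD k 0)) t (List.range m)).length := by rw [hl]; omega
    constructor
    · rw [List.length_set]; exact hl
    · intro j
      rw [getD_set_int _ _ _ _ htar, hv j, hv (k+1+m), hv k]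
      have : ¬ (k + 1 ≤ k ∧ k < k + 1 + m) := by omega
      rw [if_neg this]
      by_cases hj : j = k + 1 + m
      · subst hj; rw [if_pos rfl]
        have h1 : ¬ (k + 1 ≤ k+1+m ∧ k+1+m < k + 1 + m) := by omega
        have h2 : (k + 1 ≤ k+1+m ∧ k+1+m < k + 1 + (m+1)) := by omega
        rw [if_neg h1, if_pos h2]; ring
      · rw [if_neg hj]
        have : (k + 1 ≤ j ∧ j < k + 1 + m) ↔ (k + 1 ≤ j ∧ j < k + 1 + (m+1)) := by omega
        simp only [this]

-- how one processed card changes a cell of the table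
lemma tval_succ (ms : List Nat) (k j : Nat) :
    tval ms (k+1) j = tval ms k j
      + (if k + 1 ≤ j ∧ j < k + 1 + ms.getD k 0 then cnt ms k else 0) := by
  by_cases hj : j ≤ k
  · have h1 : min j (k+1) = min j k := by omega
    rw [tval, tval, h1, if_neg (by omega)]; ring
  · have h1 : min j (k+1) = k+1 := by omega
    have h2 : min j k = k := by omega
    rw [tval, tval, h1, h2, List.range_succ, List.map_append, List.sum_append]
    simp only [List.map_cons, List.map_nil, List.sum_cons, List.sum_nil]
    by_cases hc : j ≤ k + ms.getD k 0
    · rw [if_pos hc, if_pos (by omega)]; ring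
    · rw [if_neg hc, if_neg (by omega)]; ring

-- one outer step turns the tval-k table into the tval-(k+1) table
lemma scat_step (ms : List Nat) (k : Nat) (hk : k < ms.length)
    (hb : k + 1 + ms.getD k 0 ≤ ms.length) :
    (List.range (ms.getD k 0)).foldl
        (fun t i => t.set (k + 1 + i) (t.getD (k + 1 + i) 0 + t.getD k 0))
        ((List.range ms.length).map (tval ms k))
      = (List.range ms.length).map (tval ms (k+1)) := by
  obtain ⟨hl, hv⟩ := scat_inner ms.length k (ms.getD k 0)
    ((List.range ms.length).map (tval ms k)) (by simp) hb
  apply List.ext_getElem (by rw [hl]; simp)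
  intro j h1 h2
  have hj : j < ms.length := by rw [hl] at h1; exact h1
  rw [← List.getD_eq_getElem _ 0 h1, ← List.getD_eq_getElem _ 0 h2, hv j,
    PySem.List.getD_map_range _ _ _ _ hj, PySem.List.getD_map_range _ _ _ _ hj,
    PySem.List.getD_map_range _ _ _ _ hk, tval_self ms k k le_rfl, tval_succ]

-- processing the remaining cards from index k onwards finishes the table
lemma scat_all (ms : List Nat) : ∀ (suffix : List Nat) (k : Nat),
    suffix = ms.drop k →
    (∀ j < ms.length, j + 1 + ms.getD j 0 ≤ ms.length) →
    (List.zip (List.range' k suffix.length) suffix).foldl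
      (fun t p => (List.range p.2).foldl
        (fun t i => t.set (p.1 + 1 + i) (t.getD (p.1 + 1 + i) 0 + t.getD p.1 0)) t)
      ((List.range ms.length).map (tval ms k))
    = (List.range ms.length).map (tval ms ms.length) := by
  intro suffix
  induction suffix with
  | nil =>
    intro k hdrop _
    have : ms.length ≤ k := by
      by_contra h
      have := List.drop_eq_nil_iff.mp hdrop.symm
      omega
    simp only [List.length_nil, List.range'_zero, List.zip_nil_right, List.foldl_nil]
    apply List.map_congr_left
    intro j hj
    have hjn : j < ms.length := List.mem_range.mp hj
    rw [tval_self ms k j (by omega), tval_self ms ms.length j (le_of_lt hjn)]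
  | cons m rest ih =>
    intro k hdrop hb
    have hk : k < ms.length := by
      by_contra h
      rw [List.drop_eq_nil_iff.mpr (by omega)] at hdrop
      exact List.cons_ne_nil _ _ hdrop
    have hm : m = ms.getD k 0 := by
      have h0 : (ms.drop k).getD 0 0 = m := by rw [← hdrop]; rfl
      rw [List.getD_eq_getElem _ 0 hk, ← h0,
        List.getD_eq_getElem _ 0 (by rw [List.length_drop]; omega), List.getElem_drop]
      simp
    have hrest : rest = ms.drop (k+1) := by
      have : (m :: rest).drop 1 = (ms.drop k).drop 1 := by rw [hdrop]
      simpa [List.drop_drop] using this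
    rw [List.length_cons, List.range'_succ, List.zip_cons_cons, List.foldl_cons]
    have hstep := scat_step ms k hk (hb k hk)
    rw [hm] at *
    rw [hstep]
    exact ih (k+1) hrest hb

-- B's counts list is exactly the cnt table
lemma bcounts (ms : List Nat) : ∀ (k : Nat), k ≤ ms.length →
    (List.range k).foldl
      (fun c j => c ++ [1 + (List.range j).foldl
          (fun s i => s + (if j ≤ i + ms.getD i 0 then c.getD i 0 else 0)) 0]) []
    = (List.range k).map (cnt ms) := by
  intro k _
  induction k with
  | zero => simp
  | succ k ih =>
    rw [List.range_succ, List.foldl_append, ih (by omega), List.foldl_cons, List.foldl_nil,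
      List.map_append, List.map_cons, List.map_nil,
      PySem.List.foldl_add (g := fun i =>
        if k ≤ i + ms.getD i 0 then ((List.range k).map (cnt ms)).getD i 0 else 0)]
    congr 2
    rw [cnt_eq, zero_add]
    congr 2
    apply List.map_congr_left
    intro i hi
    rw [PySem.List.getD_map_range _ _ _ _ (List.mem_range.mp hi)]

-- the whole pipeline, stated on the list of card lines
lemma day4_main (cards : List String)
    (hb : ∀ p ∈ List.zip (List.range cards.length) cards,
      p.1 + 1 + cardMatches p.2 ≤ cards.length) :
    ((List.zip (List.range cards.length) cards).foldl
      (fun t p => (List.range (cardMatches p.2)).foldl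
        (fun t i => t.set (p.1 + 1 + i) (t.getD (p.1 + 1 + i) 0 + t.getD p.1 0)) t)
      (List.replicate cards.length (1 : Int))).sum
    = ((List.range (cards.map cardMatches).length).foldl
        (fun c j => c ++ [1 + (List.range j).foldl
          (fun s i => s + (if j ≤ i + (cards.map cardMatches).getD i 0 then c.getD i 0 else 0)) 0])
        []).sum := by
  set ms := cards.map cardMatches with hms
  have hlen : ms.length = cards.length := List.length_map _
  have hb' : ∀ j < ms.length, j + 1 + ms.getD j 0 ≤ ms.length := by
    intro j hj
    have hjc : j < cards.length := by rwa [hlen] at hj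
    have hmem : (j, cards[j]) ∈ List.zip (List.range cards.length) cards := by
      have hzl : j < (List.zip (List.range cards.length) cards).length := by
        rw [List.length_zip, List.length_range]; omega
      have : (List.zip (List.range cards.length) cards)[j]'hzl = (j, cards[j]) := by
        rw [List.getElem_zip]; simp
      rw [← this]; exact List.getElem_mem _
    have h3 := hb _ hmem
    rw [hlen, List.getD_eq_getElem _ 0 hj]
    have h4 : ms[j] = cardMatches cards[j] := by
      simp only [hms]
      rw [List.getElem_map]
    rw [h4]
    exact h3
  have hA : (List.zip (List.range cards.length) cards).foldl
      (fun t p => (List.range (cardMatches p.2)).foldl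
        (fun t i => t.set (p.1 + 1 + i) (t.getD (p.1 + 1 + i) 0 + t.getD p.1 0)) t)
      (List.replicate cards.length (1 : Int))
    = (List.zip (List.range' 0 ms.length) ms).foldl
      (fun t p => (List.range p.2).foldl
        (fun t i => t.set (p.1 + 1 + i) (t.getD (p.1 + 1 + i) 0 + t.getD p.1 0)) t)
      (List.replicate cards.length (1 : Int)) := by
    rw [← List.range_eq_range', hlen, hms, List.zip_map_right, List.foldl_map]
    rfl
  have hinit : List.replicate cards.length (1 : Int) = (List.range ms.length).map (tval ms 0) := by
    have h1 : ∀ j ∈ List.range ms.length, tval ms 0 j = (fun _ => (1 : Int)) j := by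
      intro j _; rw [tval]; simp
    rw [List.map_congr_left h1, List.map_const', List.length_range, hlen]
  have hdrop0 : ms = ms.drop 0 := rfl
  rw [hA, hinit, scat_all ms ms 0 hdrop0 hb', bcounts ms ms.length le_rfl]
  apply congrArg
  apply List.map_congr_left
  intro j hj
  exact tval_self ms ms.length j (le_of_lt (List.mem_range.mp hj))

-- ===== VERDICT (by name: the statement is the Claim_ definition above) =====
theorem day4_spec : Claim_equal_day4 := by
  intro line _ hPre
  simp only [Pre_day4] at hPre
  unfold Spec_day4 day4 day4_alt
  exact day4_main (PySem.Str.splitlines line) (fun p hp => (hPre p hp).2.2)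

theorem day4_raises : Claim_raises_day4 := by
  unfold Claim_raises_day4
  constructor
  · intro line _ hR hPre
    simp only [Raises_day4] at hR
    simp only [Pre_day4] at hPre
    obtain ⟨-, p, hp, hlt⟩ := hR
    have := (hPre p hp).2.2
    omega
  · exact ⟨by decide, by decide, by decide⟩

-- self-check: the raise witness really lies in the raise region (projection of day4_raises)
theorem pvRaiseWitness_day4_ok : Raises_day4 pvRaiseWitness_day4 := day4_raises.2.2.1
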